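-- pv_equiv track=rewrite | github.com/get-tmonier/argot | engine/argot/scoring/scorers/sequential_import_bpe.py | _blank_prose_lines
-- ===== SOURCE A (Python) =====
-- def _blank_prose_lines(src: str, ranges: frozenset[int]) -> str:
--     """Return *src* with every 1-indexed line number in *ranges* replaced by an empty string.
--
--     Used to suppress prose (docstrings, comments) before BPE scoring so that
--     natural-language tokens don't inflate the BPE score.
--     """
--     if not ranges:
--         return src
--     lines = src.splitlines(keepends=True)
--     result: list[str] = []
--     for i, line in enumerate(lines, start=1):
--         if i in ranges:
--             # Preserve the trailing newline (if any) so line count is stable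
--             result.append("\n" if line.endswith("\n") else "")
--         else:
--             result.append(line)
--     return "".join(result)
-- ===== SOURCE B (Python) =====
-- def _blank_prose_lines(src: str, ranges: frozenset[int]) -> str:
--     """Blank out the 1-indexed lines in *ranges*, keeping their trailing newlines."""
--     lines = src.splitlines(keepends=True)
--     for n in ranges:
--         if 1 <= n <= len(lines):
--             lines[n - 1] = "\n" if lines[n - 1].endswith("\n") else ""
--     return "".join(lines)
-- ===== Notes on version B (the rewrite author's own statement) =====
-- stated objective: simpler
-- what changed: B iterates over the sparse set of blanked line numbers and index-assigns into the mutable line list, instead of A's enumerate-scan of every line with a membership test per line; the empty-ranges early return disappears.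
import Mathlib
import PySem

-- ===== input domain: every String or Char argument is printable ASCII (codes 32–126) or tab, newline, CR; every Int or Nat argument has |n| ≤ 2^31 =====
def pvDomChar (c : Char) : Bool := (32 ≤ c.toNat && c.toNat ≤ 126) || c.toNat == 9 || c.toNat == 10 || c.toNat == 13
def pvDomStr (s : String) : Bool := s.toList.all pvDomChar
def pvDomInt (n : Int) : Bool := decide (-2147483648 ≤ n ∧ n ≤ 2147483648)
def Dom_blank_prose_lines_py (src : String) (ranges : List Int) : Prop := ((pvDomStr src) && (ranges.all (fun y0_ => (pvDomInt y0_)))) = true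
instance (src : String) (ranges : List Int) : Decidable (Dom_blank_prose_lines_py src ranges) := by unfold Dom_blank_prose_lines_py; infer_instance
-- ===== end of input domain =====

-- B blanks by iterating the sparse line numbers and index-assigning, instead of A's
-- enumerate-scan of every line with a per-line membership test; return values agree on Dom.

-- shared helper: src.splitlines(keepends=True), exact on Dom's characters (\n, \r, \r\n)
def pvSplitKeep : List Char → List Char → List (List Char)
  | [], cur => if cur = [] then [] else [cur.reverse]
  | '\n' :: rest, cur => ('\n' :: cur).reverse :: pvSplitKeep rest []
  | '\r' :: '\n' :: rest, cur => ('\n' :: '\r' :: cur).reverse :: pvSplitKeep rest []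
  | '\r' :: rest, cur => ('\r' :: cur).reverse :: pvSplitKeep rest []
  | c :: rest, cur => pvSplitKeep rest (c :: cur)

-- shared helper: '"\n" if line.endswith("\n") else ""'
def pvBlankLine (l : List Char) : List Char :=
  if l.getLast? = some '\n' then ['\n'] else []

-- ===== PORT A =====
-- 'for i, line in enumerate(lines, start=1): …' building `result`
def pvLoopA (ranges : List Int) (i : Int) : List (List Char) → List (List Char)
  | [] => []
  | l :: rest => (if i ∈ ranges then pvBlankLine l else l) :: pvLoopA ranges (i + 1) rest

def blank_prose_lines_py (src : String) (ranges : List Int) : String :=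
  if ranges = [] then src
  else String.ofList ((pvLoopA ranges 1 (pvSplitKeep src.toList [])).flatten)

-- ===== PORT B =====
-- 'for n in ranges: if 1 <= n <= len(lines): lines[n-1] = …'
def pvLoopB : List Int → List (List Char) → List (List Char)
  | [], ls => ls
  | n :: rs, ls =>
      pvLoopB rs
        (if 1 ≤ n ∧ n ≤ (ls.length : Int) then
          ls.set (n - 1).toNat (pvBlankLine (ls.getD (n - 1).toNat []))
        else ls)

def blank_prose_lines_py_alt (src : String) (ranges : List Int) : String :=
  String.ofList ((pvLoopB ranges (pvSplitKeep src.toList [])).flatten)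

-- ===== PRECONDITION & SPEC =====
def Spec_blank_prose_lines_py (src : String) (ranges : List Int) (out : String) : Prop := out = blank_prose_lines_py_alt src ranges
instance (src : String) (ranges : List Int) (out : String) : Decidable (Spec_blank_prose_lines_py src ranges out) := by unfold Spec_blank_prose_lines_py; infer_instance

-- ===== CLAIM (what is proved, stated in full; the proofs are below) =====
def Claim_equal_blank_prose_lines_py : Prop := ∀ (src : String) (ranges : List Int), Dom_blank_prose_lines_py src ranges → Spec_blank_prose_lines_py src ranges (blank_prose_lines_py src ranges)

-- ===== LEMMAS AND PROOFS =====

theorem pvBlankLine_idem (l : List Char) : pvBlankLine (pvBlankLine l) = pvBlankLine l := by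
  unfold pvBlankLine; split <;> simp

theorem pvSplitKeep_flatten (cs cur : List Char) :
    (pvSplitKeep cs cur).flatten = cur.reverse ++ cs := by
  induction cs, cur using pvSplitKeep.induct <;> simp_all [pvSplitKeep]

theorem pvLoopA_length (ranges : List Int) (i : Int) (ls : List (List Char)) :
    (pvLoopA ranges i ls).length = ls.length := by
  induction ls generalizing i <;> simp_all [pvLoopA]

theorem pvLoopA_getD (ranges : List Int) (ls : List (List Char)) :
    ∀ (i : Int) (j : Nat), j < ls.length →
      (pvLoopA ranges i ls).getD j [] =
        if (i + j) ∈ ranges then pvBlankLine (ls.getD j []) else ls.getD j [] := by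
  induction ls with
  | nil => intro i j h; simp at h
  | cons l rest ih =>
    intro i j h
    cases j with
    | zero => simp [pvLoopA]
    | succ k =>
      have := ih (i + 1) k (by simpa using h)
      simp only [pvLoopA, List.getD_cons_succ, this]
      have : i + 1 + (k : Int) = i + (k + 1 : Nat) := by push_cast; ring
      rw [this]

theorem pvLoopB_length (rs : List Int) (ls : List (List Char)) :
    (pvLoopB rs ls).length = ls.length := by
  induction rs generalizing ls with
  | nil => simp [pvLoopB]
  | cons n rs ih => simp only [pvLoopB]; rw [ih]; split <;> simp

theorem pvLoopB_getD (rs : List Int) :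
    ∀ (ls : List (List Char)) (j : Nat), j < ls.length →
      (pvLoopB rs ls).getD j [] =
        if ((j : Int) + 1) ∈ rs then pvBlankLine (ls.getD j []) else ls.getD j [] := by
  induction rs with
  | nil => intro ls j h; simp [pvLoopB]
  | cons n rs ih =>
    intro ls j h
    simp only [pvLoopB]
    by_cases hb : 1 ≤ n ∧ n ≤ (ls.length : Int)
    · rw [if_pos hb]
      set m := (n - 1).toNat with hm
      have hset : (ls.set m (pvBlankLine (ls.getD m []))).getD j [] =
          if m = j then pvBlankLine (ls.getD j []) else ls.getD j [] := by
        simp only [List.getD, List.getElem?_set]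
        split
        · next heq => subst heq; rw [if_pos h]; simp
        · rfl
      have hlen : (ls.set m (pvBlankLine (ls.getD m []))).length = ls.length := by simp
      rw [ih _ j (by rw [hlen]; exact h), hset]
      by_cases hmj : m = j
      · have hn : n = (j : Int) + 1 := by omega
        rw [if_pos hmj]
        rw [if_pos (show ((j : Int) + 1) ∈ n :: rs by rw [hn]; exact List.mem_cons_self ..)]
        by_cases hr : ((j : Int) + 1) ∈ rs
        · rw [if_pos hr, pvBlankLine_idem]
        · rw [if_neg hr]
      · rw [if_neg hmj]
        have hn : ¬((j : Int) + 1 = n) := by omega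
        by_cases hr : ((j : Int) + 1) ∈ rs
        · rw [if_pos hr, if_pos (List.mem_cons_of_mem _ hr)]
        · rw [if_neg hr, if_neg (by simp [List.mem_cons, hr, hn])]
    · rw [if_neg hb]
      rw [ih ls j h]
      have hn : ¬((j : Int) + 1 = n) := by rw [not_and_or] at hb; omega
      simp [List.mem_cons, hn]

theorem pvLoops_eq (ranges : List Int) (ls : List (List Char)) :
    pvLoopA ranges 1 ls = pvLoopB ranges ls := by
  apply List.ext_getElem
  · rw [pvLoopA_length, pvLoopB_length]
  · intro j h1 h2
    have hj : j < ls.length := by rw [pvLoopA_length] at h1; exact h1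
    have a := pvLoopA_getD ranges ls 1 j hj
    have b := pvLoopB_getD ranges ls j hj
    have ha : (pvLoopA ranges 1 ls)[j] = (pvLoopA ranges 1 ls).getD j [] := by
      rw [List.getD_eq_getElem?_getD, List.getElem?_eq_getElem h1]; rfl
    have hb : (pvLoopB ranges ls)[j] = (pvLoopB ranges ls).getD j [] := by
      rw [List.getD_eq_getElem?_getD, List.getElem?_eq_getElem h2]; rfl
    rw [ha, hb, a, b]
    have : (1 : Int) + j = (j : Int) + 1 := by ring
    rw [this]

-- ===== VERDICT (by name: the statement is the Claim_ definition above) =====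
theorem blank_prose_lines_py_spec : Claim_equal_blank_prose_lines_py := by
  intro src ranges _
  show blank_prose_lines_py src ranges = blank_prose_lines_py_alt src ranges
  unfold blank_prose_lines_py blank_prose_lines_py_alt
  split
  · next h =>
    subst h
    simp [pvLoopB, pvSplitKeep_flatten, String.ofList_toList]
  · rw [pvLoops_eq]
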